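-- pv_equiv track=rewrite | github.com/pypi-data/pypi-mirror-385 | packages/piltext/piltext-0.5.0.tar.gz/piltext-0.5.0/piltext/ascii_art.py | _build_grid_line_with_borders_before_removal
-- ===== SOURCE A (Python) =====
-- def _build_grid_line_with_borders_before_removal(
--     aligned_text: str,
--     grid_row: list[str],
--     start_col: int,
--     end_col: int,
--     columns: int,
--     cell_width: int,
-- ) -> list[str]:
--     """
--     Build a grid line with text before border removal.
--     Text is aligned for content-only width (no gaps), then distributed into cells.
--     Border removal will add gaps between cells, but text is already in the right cells.
--     """
--     chars_per_cell = cell_width - 2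
--
--     text_idx = 0
--     line_parts = []
--
--     for col in range(columns):
--         if col >= start_col and col <= end_col:
--             content = aligned_text[text_idx : text_idx + chars_per_cell]
--             if len(content) < chars_per_cell:
--                 content = content.ljust(chars_per_cell)
--
--             line_parts.append("|" + content + "|")
--             text_idx += chars_per_cell
--         else:
--             line_parts.append(grid_row[col])
--
--     return line_parts
-- ===== SOURCE B (Python) =====
-- def _build_grid_line_with_borders_before_removal(
--     aligned_text: str,
--     grid_row: list[str],
--     start_col: int,
--     end_col: int,
--     columns: int,
--     cell_width: int,
-- ) -> list[str]:
--     chars_per_cell = cell_width - 2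
--     lo = max(start_col, 0)
--     hi = min(end_col, columns - 1)
--     # preallocate the whole row, then overwrite each region in its own fill pass
--     line = [""] * max(columns, 0)
--     for col in range(lo, hi + 1):  # text band: closed-form offsets, no running index
--         s = aligned_text[(col - lo) * chars_per_cell : (col - lo + 1) * chars_per_cell]
--         line[col] = "|" + s + " " * (chars_per_cell - len(s)) + "|"
--     for col in range(min(lo, columns)):  # grid prefix
--         line[col] = grid_row[col]
--     for col in range(max(lo, hi + 1), columns):  # grid suffix
--         line[col] = grid_row[col]
--     return line
-- ===== Notes on version B (the rewrite author's own statement) =====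
-- stated objective: alternative
-- what changed: Replaces A's single accumulate loop (per-column branch, running text_idx, append) by preallocating the whole output row and overwriting it in three separate branch-free fill passes: the text band (closed-form offsets), the grid prefix and the grid suffix.
import Mathlib
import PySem

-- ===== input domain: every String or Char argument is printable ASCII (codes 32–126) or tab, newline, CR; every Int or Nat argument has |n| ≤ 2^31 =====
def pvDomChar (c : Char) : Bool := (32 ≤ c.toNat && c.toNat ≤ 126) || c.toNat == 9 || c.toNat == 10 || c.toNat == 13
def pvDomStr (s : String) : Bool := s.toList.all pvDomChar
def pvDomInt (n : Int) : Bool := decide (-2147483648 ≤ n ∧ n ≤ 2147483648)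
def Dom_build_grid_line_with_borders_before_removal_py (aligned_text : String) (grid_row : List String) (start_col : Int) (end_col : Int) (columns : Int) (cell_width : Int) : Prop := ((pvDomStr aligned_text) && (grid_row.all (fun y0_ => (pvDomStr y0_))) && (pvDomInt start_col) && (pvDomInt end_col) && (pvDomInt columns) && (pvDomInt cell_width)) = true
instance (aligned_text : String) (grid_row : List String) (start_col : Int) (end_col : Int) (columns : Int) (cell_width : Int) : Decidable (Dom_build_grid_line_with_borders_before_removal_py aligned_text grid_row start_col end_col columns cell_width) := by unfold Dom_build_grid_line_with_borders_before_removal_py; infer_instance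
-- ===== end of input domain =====

-- B replaces A's single accumulate loop (per-column branch, running text_idx, append) by preallocating the
-- whole output row and overwriting it in three separate branch-free fill passes (text band with closed-form
-- offsets, grid prefix, grid suffix); alternative decomposition, same cost; equivalence proved on Pre_,
-- i.e. exactly where A raises no IndexError.

-- ===== PORT A =====
-- A's loop body; `pyGetD … ""` : the "" default is unreachable under Pre_ (none = IndexError, excluded)
def pvAStep (text : List Char) (grid_row : List String) (start_col : Int) (end_col : Int) (cpc : Int)
    (st : Int × List String) (col : Int) : Int × List String :=
  if start_col ≤ col ∧ col ≤ end_col then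
    let content := PySem.Chars.slice text (some st.1) (some (st.1 + cpc))
    -- content.ljust(chars_per_cell), applied only when len(content) < chars_per_cell (exact: pad with spaces)
    let content2 := if (content.length : Int) < cpc then content ++ List.replicate (cpc - (content.length : Int)).toNat ' ' else content
    (st.1 + cpc, st.2 ++ [String.mk ('|' :: content2 ++ ['|'])])
  else
    (st.1, st.2 ++ [PySem.List.pyGetD grid_row col ""])

def build_grid_line_with_borders_before_removal_py (aligned_text : String) (grid_row : List String) (start_col : Int) (end_col : Int) (columns : Int) (cell_width : Int) : List String :=
  ((PySem.List.pyRange 0 columns 1).foldl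
    (pvAStep aligned_text.toList grid_row start_col end_col (cell_width - 2)) (0, [])).2

-- ===== PORT B =====
-- one band cell: "|" + aligned_text[(c-lo)*cpc : (c-lo+1)*cpc] + " "*(cpc-len(s)) + "|"
def pvBCell (text : List Char) (lo : Int) (cpc : Int) (c : Int) : String :=
  let content := PySem.Chars.slice text (some ((c - lo) * cpc)) (some ((c - lo + 1) * cpc))
  String.mk ('|' :: (content ++ List.replicate (cpc - (content.length : Int)).toNat ' ') ++ ['|'])

-- line[col] = v col  (col is always a valid nonnegative index of line in Source B's three fill loops)
def pvBFill (v : Int → String) (line : List String) (col : Int) : List String :=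
  line.set col.toNat (v col)

def build_grid_line_with_borders_before_removal_py_alt (aligned_text : String) (grid_row : List String) (start_col : Int) (end_col : Int) (columns : Int) (cell_width : Int) : List String :=
  let cpc := cell_width - 2
  let lo := max start_col 0
  let hi := min end_col (columns - 1)
  -- line = [""] * max(columns, 0)
  let line0 := List.replicate (max columns 0).toNat ""
  -- fill pass 1: the text band
  let line1 := (PySem.List.pyRange lo (hi + 1) 1).foldl (pvBFill (pvBCell aligned_text.toList lo cpc)) line0
  -- fill pass 2: the grid prefix
  let line2 := (PySem.List.pyRange 0 (min lo columns) 1).foldl (pvBFill (fun c => PySem.List.pyGetD grid_row c "")) line1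
  -- fill pass 3: the grid suffix
  (PySem.List.pyRange (max lo (hi + 1)) columns 1).foldl (pvBFill (fun c => PySem.List.pyGetD grid_row c "")) line2

-- ===== PRECONDITION & SPEC =====
-- Pre_ is exactly the set where A raises no IndexError: every column of range(columns) OUTSIDE the
-- [start_col, end_col] band must be a valid index into grid_row (closed form over the two contiguous out-of-band stretches).
def Pre_build_grid_line_with_borders_before_removal_py (aligned_text : String) (grid_row : List String) (start_col : Int) (end_col : Int) (columns : Int) (cell_width : Int) : Prop :=
  columns ≤ 0 ∨
    ((start_col ≤ 0 ∨ min start_col columns ≤ (grid_row.length : Int)) ∧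
     (columns - 1 ≤ end_col ∨ columns ≤ (grid_row.length : Int)))
instance (aligned_text : String) (grid_row : List String) (start_col : Int) (end_col : Int) (columns : Int) (cell_width : Int) : Decidable (Pre_build_grid_line_with_borders_before_removal_py aligned_text grid_row start_col end_col columns cell_width) := by unfold Pre_build_grid_line_with_borders_before_removal_py; infer_instance

def pvWitness_build_grid_line_with_borders_before_removal_py : String × List String × Int × Int × Int × Int :=
  ("ab", ["x", "y", "z"], 0, 1, 3, 4)

def Spec_build_grid_line_with_borders_before_removal_py (aligned_text : String) (grid_row : List String) (start_col : Int) (end_col : Int) (columns : Int) (cell_width : Int) (out : List String) : Prop := out = build_grid_line_with_borders_before_removal_py_alt aligned_text grid_row start_col end_col columns cell_width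
instance (aligned_text : String) (grid_row : List String) (start_col : Int) (end_col : Int) (columns : Int) (cell_width : Int) (out : List String) : Decidable (Spec_build_grid_line_with_borders_before_removal_py aligned_text grid_row start_col end_col columns cell_width out) := by unfold Spec_build_grid_line_with_borders_before_removal_py; infer_instance

-- ===== CLAIM (what is proved, stated in full; the proofs are below) =====
def Claim_equal_build_grid_line_with_borders_before_removal_py : Prop := ∀ (aligned_text : String) (grid_row : List String) (start_col : Int) (end_col : Int) (columns : Int) (cell_width : Int), Dom_build_grid_line_with_borders_before_removal_py aligned_text grid_row start_col end_col columns cell_width → Pre_build_grid_line_with_borders_before_removal_py aligned_text grid_row start_col end_col columns cell_width → Spec_build_grid_line_with_borders_before_removal_py aligned_text grid_row start_col end_col columns cell_width (build_grid_line_with_borders_before_removal_py aligned_text grid_row start_col end_col columns cell_width)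

-- ===== LEMMAS AND PROOFS =====

-- the band-branch cell A builds when text_idx = t (proof-side characterisation of pvAStep's then-branch)
def pvACell (text : List Char) (cpc : Int) (t : Int) : String :=
  let content := PySem.Chars.slice text (some t) (some (t + cpc))
  let content2 := if (content.length : Int) < cpc then content ++ List.replicate (cpc - (content.length : Int)).toNat ' ' else content
  String.mk ('|' :: content2 ++ ['|'])

-- A's conditional ljust equals B's unconditional padding
lemma pvACell_eq_pvBCell (text : List Char) (cpc lo c : Int) :
    pvACell text cpc ((c - lo) * cpc) = pvBCell text lo cpc c := by
  have harg : (c - lo) * cpc + cpc = (c - lo + 1) * cpc := by ring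
  unfold pvACell pvBCell
  rw [harg]
  set content := PySem.Chars.slice text (some ((c - lo) * cpc)) (some ((c - lo + 1) * cpc)) with hc
  by_cases h : (content.length : Int) < cpc
  · simp [h]
  · have : (cpc - (content.length : Int)).toNat = 0 := by omega
    simp [h, this]

-- folding A's step over an all-out-of-band range just copies grid_row entries
lemma pvFold_else (text : List Char) (grid_row : List String) (start_col end_col cpc : Int)
    (a b : Int) (t : Int) (acc : List String)
    (h : ∀ c, a ≤ c → c < b → (c < start_col ∨ end_col < c)) :
    (PySem.List.pyRange a b 1).foldl (pvAStep text grid_row start_col end_col cpc) (t, acc)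
      = (t, acc ++ (PySem.List.pyRange a b 1).map (fun c => PySem.List.pyGetD grid_row c "")) := by
  by_cases hab : b ≤ a
  · rw [PySem.List.pyRange_one_eq_nil hab]; simp
  · push_neg at hab
    have hlt : (b - (a + 1)).toNat < (b - a).toNat := by omega
    rw [PySem.List.pyRange_one_cons hab]
    have hstep : pvAStep text grid_row start_col end_col cpc (t, acc) a
        = (t, acc ++ [PySem.List.pyGetD grid_row a ""]) := by
      have := h a le_rfl hab
      unfold pvAStep
      rw [if_neg (by omega)]
    simp only [List.foldl_cons, List.map_cons, hstep]
    rw [pvFold_else text grid_row start_col end_col cpc (a + 1) b t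
        (acc ++ [PySem.List.pyGetD grid_row a ""]) (fun c h1 h2 => h c (by omega) h2)]
    simp
termination_by (b - a).toNat
decreasing_by omega

-- folding A's step over an all-in-band range: text_idx advances cpc per cell, cells get closed-form offsets
lemma pvFold_band (text : List Char) (grid_row : List String) (start_col end_col cpc : Int)
    (lo b : Int) (t : Int) (acc : List String)
    (h : ∀ c, lo ≤ c → c < b → (start_col ≤ c ∧ c ≤ end_col)) :
    (PySem.List.pyRange lo b 1).foldl (pvAStep text grid_row start_col end_col cpc) (t, acc)
      = (t + (b - lo).toNat * cpc,
         acc ++ (PySem.List.pyRange lo b 1).map (fun c => pvACell text cpc (t + (c - lo) * cpc))) := by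
  by_cases hab : b ≤ lo
  · rw [PySem.List.pyRange_one_eq_nil hab]
    have : (b - lo).toNat = 0 := by omega
    simp [this]
  · push_neg at hab
    have hlt : (b - (lo + 1)).toNat < (b - lo).toNat := by omega
    rw [PySem.List.pyRange_one_cons hab]
    have hstep : pvAStep text grid_row start_col end_col cpc (t, acc) lo
        = (t + cpc, acc ++ [pvACell text cpc t]) := by
      have := h lo le_rfl hab
      unfold pvAStep pvACell
      rw [if_pos (by omega)]
    simp only [List.foldl_cons, List.map_cons, hstep]
    rw [pvFold_band text grid_row start_col end_col cpc (lo + 1) b (t + cpc)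
        (acc ++ [pvACell text cpc t]) (fun c h1 h2 => h c (by omega) h2)]
    have e1 : t + cpc + (b - (lo + 1)).toNat * cpc = t + (b - lo).toNat * cpc := by
      have h1 : ((b - (lo + 1)).toNat : Int) = b - lo - 1 := by omega
      have h2 : ((b - lo).toNat : Int) = b - lo := by omega
      rw [h1, h2]; ring
    have e2 : ∀ c : Int, t + cpc + (c - (lo + 1)) * cpc = t + (c - lo) * cpc := by intro c; ring
    simp only [e1, e2, List.append_assoc, List.singleton_append, sub_self, zero_mul, add_zero]
termination_by (b - lo).toNat
decreasing_by omega

-- a B-side fill pass over [a, b) overwrites exactly that segment of the row with the fill values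
lemma pvSetFold (v : Int → String) (st : List String) (a b : Int)
    (h0 : 0 ≤ a) (hab : a ≤ b) (hb : b ≤ (st.length : Int)) :
    (PySem.List.pyRange a b 1).foldl (pvBFill v) st
      = st.take a.toNat ++ (PySem.List.pyRange a b 1).map v ++ st.drop b.toNat := by
  by_cases hba : b ≤ a
  · rw [PySem.List.pyRange_one_eq_nil hba]
    have hEq : a.toNat = b.toNat := by omega
    simp [hEq, List.take_append_drop]
  · push_neg at hba
    have hlt : (b - (a + 1)).toNat < (b - a).toNat := by omega
    have hal : a.toNat < st.length := by omega
    rw [PySem.List.pyRange_one_cons hba]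
    simp only [List.foldl_cons, List.map_cons]
    have hset : pvBFill v st a = st.take a.toNat ++ v a :: st.drop (a.toNat + 1) := by
      unfold pvBFill
      exact List.set_eq_take_cons_drop (v a) hal
    rw [pvSetFold v (pvBFill v st a) (a + 1) b (by omega) (by omega)
        (by unfold pvBFill; simp; omega)]
    rw [hset]
    have hassoc : st.take a.toNat ++ v a :: st.drop (a.toNat + 1)
        = (st.take a.toNat ++ [v a]) ++ st.drop (a.toNat + 1) := by simp
    have hlen : (st.take a.toNat ++ [v a]).length = (a + 1).toNat := by simp; omega
    have htake : (st.take a.toNat ++ v a :: st.drop (a.toNat + 1)).take (a + 1).toNat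
        = st.take a.toNat ++ [v a] := by
      rw [hassoc]
      exact List.take_left' hlen
    have hdrop : (st.take a.toNat ++ v a :: st.drop (a.toNat + 1)).drop b.toNat
        = st.drop b.toNat := by
      rw [hassoc]
      have hb1 : b.toNat = (st.take a.toNat ++ [v a]).length + (b.toNat - (a.toNat + 1)) := by
        rw [hlen]; omega
      rw [hb1, List.drop_length_add_append, List.drop_drop]
      congr 1
      rw [hlen]
      omega
    rw [htake, hdrop]
    simp
termination_by (b - a).toNat
decreasing_by omega

-- length of a mapped range block
lemma pvMapRangeLen (v : Int → String) (a b : Int) :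
    ((PySem.List.pyRange a b 1).map v).length = (b - a).toNat := by
  simp [PySem.List.length_pyRange_one]

-- ===== VERDICT (by name: the statement is the Claim_ definition above) =====
theorem build_grid_line_with_borders_before_removal_py_spec : Claim_equal_build_grid_line_with_borders_before_removal_py := by
  intro aligned_text grid_row start_col end_col columns cell_width _hDom hPre
  unfold Spec_build_grid_line_with_borders_before_removal_py
  unfold build_grid_line_with_borders_before_removal_py build_grid_line_with_borders_before_removal_py_alt
  unfold Pre_build_grid_line_with_borders_before_removal_py at hPre
  simp only []
  set text := aligned_text.toList
  set cpc := cell_width - 2 with hcpc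
  set lo := max start_col 0 with hlo
  set hi := min end_col (columns - 1) with hhi
  set L : Int := (grid_row.length : Int) with hL
  have hL0 : 0 ≤ L := by positivity
  set gD : Int → String := fun c => PySem.List.pyGetD grid_row c "" with hgD
  by_cases hcols : columns ≤ 0
  · -- columns ≤ 0 : A's range is empty, B's row is empty and all three fills are empty
    rw [PySem.List.pyRange_one_eq_nil hcols,
        PySem.List.pyRange_one_eq_nil (show hi + 1 ≤ lo by omega),
        PySem.List.pyRange_one_eq_nil (show min lo columns ≤ 0 by omega),
        PySem.List.pyRange_one_eq_nil (show columns ≤ max lo (hi + 1) by omega)]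
    have : (max columns 0).toNat = 0 := by omega
    simp [this]
  · push_neg at hcols
    have hmax : (max columns 0).toNat = columns.toNat := by omega
    rw [hmax]
    set n := columns.toNat with hn
    have hnL : (List.replicate n "").length = n := by simp
    by_cases hempty : hi < lo
    · -- empty band: A copies every column; B fills the whole row from grid_row in passes 2 and 3
      have hcL : columns ≤ L := by
        rcases hPre with h | ⟨h1, h2⟩
        · omega
        · rcases h2 with h2 | h2
          · rcases h1 with h1 | h1 <;> omega
          · exact h2
      rw [pvFold_else text grid_row start_col end_col cpc 0 columns 0 []
          (by intro c h1 h2; omega)]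
      rw [PySem.List.pyRange_one_eq_nil (show hi + 1 ≤ lo by omega)]
      simp only [List.foldl_nil, List.nil_append]
      by_cases hloc : columns ≤ lo
      · -- prefix pass covers the whole row, suffix pass is empty
        have hminlo : min lo columns = columns := by omega
        rw [hminlo,
            pvSetFold gD (List.replicate n "") 0 columns le_rfl (by omega) (by rw [hnL]; omega),
            PySem.List.pyRange_one_eq_nil (show columns ≤ max lo (hi + 1) by omega)]
        simp only [List.foldl_nil]
        have : n ≤ columns.toNat := by omega
        simp [List.drop_replicate, hn]
        intro a _ _
        rfl
      · -- prefix pass [0, lo), suffix pass [lo, columns)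
        push_neg at hloc
        have hminlo : min lo columns = lo := by omega
        have hmaxlo : max lo (hi + 1) = lo := by omega
        rw [hminlo, hmaxlo,
            pvSetFold gD (List.replicate n "") 0 lo le_rfl (by omega) (by rw [hnL]; omega)]
        simp only [Int.toNat_zero, List.take_zero, List.nil_append, List.drop_replicate]
        set st2 := (PySem.List.pyRange 0 lo 1).map gD ++ List.replicate (n - lo.toNat) "" with hst2
        have hst2len : (st2.length : Int) = (n : Int) := by
          rw [hst2]; simp [pvMapRangeLen]; omega
        rw [pvSetFold gD st2 lo columns (by omega) (by omega) (by omega)]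
        have htake : st2.take lo.toNat = (PySem.List.pyRange 0 lo 1).map gD := by
          rw [hst2]
          exact List.take_left' (by rw [pvMapRangeLen]; omega)
        have hdropn : st2.drop columns.toNat = [] := by
          apply List.drop_eq_nil_of_le
          omega
        rw [htake, hdropn, List.append_nil,
            ← List.map_append, ← PySem.List.pyRange_one_append 0 lo columns (by omega) (by omega)]
    · -- nonempty band [lo, hi] ⊆ [0, columns-1]
      push_neg at hempty
      have h0lo : 0 ≤ lo := by omega
      have hhic : hi ≤ columns - 1 := by omega
      have hloL : lo ≤ L := by
        rcases hPre with h | ⟨h1, h2⟩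
        · omega
        · rcases h1 with h1 | h1 <;> omega
      -- A: split range(columns) into [0,lo) ++ [lo,hi+1) ++ [hi+1,columns)
      rw [PySem.List.pyRange_one_append 0 lo columns h0lo (by omega),
          PySem.List.pyRange_one_append lo (hi + 1) columns (by omega) (by omega)]
      rw [List.foldl_append, List.foldl_append]
      rw [pvFold_else text grid_row start_col end_col cpc 0 lo 0 []
          (by intro c h1 h2; omega)]
      rw [pvFold_band text grid_row start_col end_col cpc lo (hi + 1) 0 _
          (by intro c h1 h2; omega)]
      rw [pvFold_else text grid_row start_col end_col cpc (hi + 1) columns _ _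
          (by intro c h1 h2; omega)]
      simp only [List.nil_append, List.append_assoc]
      have hcells : (PySem.List.pyRange lo (hi + 1) 1).map (fun c => pvACell text cpc (0 + (c - lo) * cpc))
          = (PySem.List.pyRange lo (hi + 1) 1).map (pvBCell text lo cpc) := by
        apply List.map_congr_left
        intro c _
        rw [zero_add, pvACell_eq_pvBCell]
      rw [hcells]
      -- B: pass 1 writes the band cells
      set cells := (PySem.List.pyRange lo (hi + 1) 1).map (pvBCell text lo cpc) with hcellsdef
      have hcellslen : cells.length = (hi + 1 - lo).toNat := by
        rw [hcellsdef, pvMapRangeLen]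
      have hpass1 : (PySem.List.pyRange lo (hi + 1) 1).foldl (pvBFill (pvBCell text lo cpc))
            (List.replicate n "")
          = List.replicate lo.toNat "" ++ cells ++ List.replicate (n - (hi + 1).toNat) "" := by
        rw [pvSetFold (pvBCell text lo cpc) (List.replicate n "") lo (hi + 1) h0lo (by omega)
            (by rw [hnL]; omega),
           List.take_replicate, List.drop_replicate,
           show min lo.toNat n = lo.toNat from by omega]
      rw [hpass1]
      set st1 := List.replicate lo.toNat "" ++ cells ++ List.replicate (n - (hi + 1).toNat) "" with hst1
      have hst1len : (st1.length : Int) = (n : Int) := by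
        rw [hst1]; simp [hcellslen]; omega
      -- B: pass 2 writes the prefix
      have hminlo : min lo columns = lo := by omega
      rw [hminlo, pvSetFold gD st1 0 lo le_rfl h0lo (by omega)]
      simp only [Int.toNat_zero, List.take_zero, List.nil_append]
      have hdrop1 : st1.drop lo.toNat = cells ++ List.replicate (n - (hi + 1).toNat) "" := by
        rw [hst1, List.append_assoc]
        exact List.drop_left' (by simp)
      rw [hdrop1]
      set st2 := (PySem.List.pyRange 0 lo 1).map gD ++ (cells ++ List.replicate (n - (hi + 1).toNat) "") with hst2
      have hst2len : (st2.length : Int) = (n : Int) := by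
        rw [hst2]; simp [pvMapRangeLen, hcellslen]; omega
      -- B: pass 3 writes the suffix
      have hmaxlo : max lo (hi + 1) = hi + 1 := by omega
      rw [hmaxlo, pvSetFold gD st2 (hi + 1) columns (by omega) (by omega) (by omega)]
      have htake2 : st2.take (hi + 1).toNat = (PySem.List.pyRange 0 lo 1).map gD ++ cells := by
        rw [hst2, ← List.append_assoc]
        exact List.take_left' (by rw [List.length_append, pvMapRangeLen, hcellslen]; omega)
      have hdrop2 : st2.drop columns.toNat = [] := by
        apply List.drop_eq_nil_of_le
        omega
      rw [htake2, hdrop2, List.append_nil, List.append_assoc]
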